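-- pv_equiv track=rewrite | github.com/Nnutural/CompAssistant | backend/app/agents/agent_factory.py | _classify_runtime_exception
-- ===== SOURCE A (Python) =====
-- def _classify_runtime_exception(exc: Exception) -> str:
--     message = str(exc).lower()
--     if "additionalproperties should not be set" in message or "strict json schema is enabled" in message:
--         return "schema_compatibility_error"
--     if "invalid json when parsing" in message or "json_invalid" in message:
--         return "provider_response_parse_error"
--     if any(
--         token in message
--         for token in ("max turns", "timeout", "timed out", "rate limit", "429", "500", "server error", "connection error")
--     ):
--         return "provider_exception"
--     return "runtime_error"
-- ===== SOURCE B (Python) =====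
-- # Priority aggregation: every token carries the priority of its category; we take
-- # the minimum priority among ALL matching tokens, which equals the first rule
-- # A's ordered chain would have fired (3 = no match -> runtime_error).
-- _TOKEN_PRIORITY = [
--     ("additionalproperties should not be set", 0),
--     ("strict json schema is enabled", 0),
--     ("invalid json when parsing", 1),
--     ("json_invalid", 1),
--     ("max turns", 2),
--     ("timeout", 2),
--     ("timed out", 2),
--     ("rate limit", 2),
--     ("429", 2),
--     ("500", 2),
--     ("server error", 2),
--     ("connection error", 2),
-- ]
--
-- _CATEGORIES = [
--     "schema_compatibility_error",
--     "provider_response_parse_error",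
--     "provider_exception",
--     "runtime_error",
-- ]
--
--
-- def _classify_runtime_exception(exc):
--     message = str(exc).lower()
--     best = min((p for token, p in _TOKEN_PRIORITY if token in message), default=3)
--     return _CATEGORIES[best]
-- ===== Notes on version B (the rewrite author's own statement) =====
-- stated objective: alternative
-- what changed: Replaces the ordered early-return substring chain with a flat token-to-priority table scanned exhaustively, taking the minimum matching priority and indexing a category list.
import Mathlib
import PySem

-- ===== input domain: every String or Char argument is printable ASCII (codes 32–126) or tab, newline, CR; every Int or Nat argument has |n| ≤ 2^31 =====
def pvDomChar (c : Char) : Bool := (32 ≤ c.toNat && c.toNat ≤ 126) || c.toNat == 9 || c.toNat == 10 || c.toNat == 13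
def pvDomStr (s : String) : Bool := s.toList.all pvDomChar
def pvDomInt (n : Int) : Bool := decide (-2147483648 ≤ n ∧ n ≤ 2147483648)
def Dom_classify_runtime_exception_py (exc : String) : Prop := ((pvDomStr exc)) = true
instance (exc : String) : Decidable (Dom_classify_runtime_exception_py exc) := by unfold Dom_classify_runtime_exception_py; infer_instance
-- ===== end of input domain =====

-- B replaces A's ordered early-return substring chain with a flat token->priority
-- table scanned exhaustively, taking the minimum matching priority (alternative, same cost).


-- ===== PORT A =====
def classify_runtime_exception_py (exc : String) : String :=
  let message := PySem.Str.lower exc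
  if PySem.Str.isIn "additionalproperties should not be set" message
      || PySem.Str.isIn "strict json schema is enabled" message then
    "schema_compatibility_error"
  else if PySem.Str.isIn "invalid json when parsing" message
      || PySem.Str.isIn "json_invalid" message then
    "provider_response_parse_error"
  else if ["max turns", "timeout", "timed out", "rate limit", "429", "500",
           "server error", "connection error"].any
            (fun token => PySem.Str.isIn token message) then
    "provider_exception"
  else
    "runtime_error"

-- ===== PORT B =====
def pvTokenPriority : List (String × Nat) :=
  [ ("additionalproperties should not be set", 0),
    ("strict json schema is enabled", 0),
    ("invalid json when parsing", 1),
    ("json_invalid", 1),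
    ("max turns", 2),
    ("timeout", 2),
    ("timed out", 2),
    ("rate limit", 2),
    ("429", 2),
    ("500", 2),
    ("server error", 2),
    ("connection error", 2) ]

def pvCategories : List String :=
  [ "schema_compatibility_error",
    "provider_response_parse_error",
    "provider_exception",
    "runtime_error" ]

-- Python's min(gen, default=3): the minimum of the matching priorities, 3 if none match.
def pvMinD (xs : List Nat) : Nat :=
  match xs with
  | [] => 3
  | x :: rest => rest.foldl min x

def classify_runtime_exception_py_alt (exc : String) : String :=
  let message := PySem.Str.lower exc
  let best := pvMinD (pvTokenPriority.filterMap
    (fun tp => if PySem.Str.isIn tp.1 message then some tp.2 else none))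
  -- _CATEGORIES[best]: best is always in range, so the IndexError default "" is never used
  (PySem.List.pyGet? pvCategories (Int.ofNat best)).getD ""

-- ===== PRECONDITION & SPEC =====
def Spec_classify_runtime_exception_py (exc : String) (out : String) : Prop := out = classify_runtime_exception_py_alt exc
instance (exc : String) (out : String) : Decidable (Spec_classify_runtime_exception_py exc out) := by unfold Spec_classify_runtime_exception_py; infer_instance

-- ===== CLAIM (what is proved, stated in full; the proofs are below) =====
def Claim_equal_classify_runtime_exception_py : Prop := ∀ (exc : String), Dom_classify_runtime_exception_py exc → Spec_classify_runtime_exception_py exc (classify_runtime_exception_py exc)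

-- ===== LEMMAS AND PROOFS =====

-- ===== VERDICT (by name: the statement is the Claim_ definition above) =====
set_option maxHeartbeats 2000000 in
theorem classify_runtime_exception_py_spec : Claim_equal_classify_runtime_exception_py := by
  intro exc _
  unfold Spec_classify_runtime_exception_py classify_runtime_exception_py
    classify_runtime_exception_py_alt pvTokenPriority pvCategories
  simp only [List.any_cons, List.any_nil, Bool.or_false, List.filterMap_cons, List.filterMap_nil]
  generalize PySem.Str.isIn "additionalproperties should not be set" (PySem.Str.lower exc) = b1
  generalize PySem.Str.isIn "strict json schema is enabled" (PySem.Str.lower exc) = b2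
  generalize PySem.Str.isIn "invalid json when parsing" (PySem.Str.lower exc) = b3
  generalize PySem.Str.isIn "json_invalid" (PySem.Str.lower exc) = b4
  generalize PySem.Str.isIn "max turns" (PySem.Str.lower exc) = b5
  generalize PySem.Str.isIn "timeout" (PySem.Str.lower exc) = b6
  generalize PySem.Str.isIn "timed out" (PySem.Str.lower exc) = b7
  generalize PySem.Str.isIn "rate limit" (PySem.Str.lower exc) = b8
  generalize PySem.Str.isIn "429" (PySem.Str.lower exc) = b9
  generalize PySem.Str.isIn "500" (PySem.Str.lower exc) = b10
  generalize PySem.Str.isIn "server error" (PySem.Str.lower exc) = b11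
  generalize PySem.Str.isIn "connection error" (PySem.Str.lower exc) = b12
  revert b1 b2 b3 b4 b5 b6 b7 b8 b9 b10 b11 b12
  decide
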